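-- pv_equiv track=rewrite | github.com/sacki123/django_training | chuc_nang/Print/insurer/print_helper.py | count_treatment_dates
-- ===== SOURCE A (Python) =====
-- def count_treatment_dates(treatment_dates, target_day='1'):
--     """Count number of target_day in treatment_dates
--     """
--     if not treatment_dates:
--         return 0
--
--     if not isinstance(target_day, list):
--         target_day = [target_day]
--
--     count = 0
--     for day in target_day:
--         count += treatment_dates.count(day)
--
--     return count
-- ===== SOURCE B (Python) =====
-- def count_treatment_dates(treatment_dates, target_day='1'):
--     """Count number of target_day in treatment_dates"""
--     targets = target_day if isinstance(target_day, list) else [target_day]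
--     return sum(targets.count(date) for date in treatment_dates or [])
-- ===== Notes on version B (the rewrite author's own statement) =====
-- stated objective: simpler
-- what changed: Inverts the scan direction: instead of looping over the targets and running .count over the data for each, B makes one pass over treatment_dates and sums each date's multiplicity in the target list, collapsing the empty-guard and accumulator loop into a single sum expression.
import Mathlib
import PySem

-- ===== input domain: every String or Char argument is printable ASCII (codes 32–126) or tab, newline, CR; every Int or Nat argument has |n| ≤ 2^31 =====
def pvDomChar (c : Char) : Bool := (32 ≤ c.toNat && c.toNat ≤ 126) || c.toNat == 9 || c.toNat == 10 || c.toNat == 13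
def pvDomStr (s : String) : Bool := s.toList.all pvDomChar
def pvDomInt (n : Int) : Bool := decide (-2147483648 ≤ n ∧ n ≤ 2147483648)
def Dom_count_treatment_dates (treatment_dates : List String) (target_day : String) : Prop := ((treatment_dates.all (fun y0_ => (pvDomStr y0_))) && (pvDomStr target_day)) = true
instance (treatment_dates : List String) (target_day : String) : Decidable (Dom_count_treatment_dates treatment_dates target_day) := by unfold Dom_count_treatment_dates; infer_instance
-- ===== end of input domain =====

-- ===== PORT A =====
-- transliteration of A: empty guard, wrap the target in a list, loop over the targets
-- adding treatment_dates.count(day) to an accumulator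
def count_treatment_dates (treatment_dates : List String) (target_day : String) : Int :=
  if treatment_dates = [] then 0
  else
    [target_day].foldl (fun count day => count + PySem.List.count treatment_dates day) 0

-- ===== PORT B =====
-- B inverts the scan: one sum over treatment_dates of each date's multiplicity in the target list.
-- transliteration of Source B's 'sum(targets.count(date) for date in treatment_dates or [])'
def count_treatment_dates_alt (treatment_dates : List String) (target_day : String) : Int :=
  (treatment_dates.map (fun date => PySem.List.count [target_day] date)).sum

-- ===== PRECONDITION & SPEC =====
def Spec_count_treatment_dates (treatment_dates : List String) (target_day : String) (out : Int) : Prop := out = count_treatment_dates_alt treatment_dates target_day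
instance (treatment_dates : List String) (target_day : String) (out : Int) : Decidable (Spec_count_treatment_dates treatment_dates target_day out) := by unfold Spec_count_treatment_dates; infer_instance

-- ===== CLAIM (what is proved, stated in full; the proofs are below) =====
def Claim_equal_count_treatment_dates : Prop := ∀ (treatment_dates : List String) (target_day : String), Dom_count_treatment_dates treatment_dates target_day → Spec_count_treatment_dates treatment_dates target_day (count_treatment_dates treatment_dates target_day)

-- ===== LEMMAS AND PROOFS =====

-- ===== VERDICT (by name: the statement is the Claim_ definition above) =====
lemma sum_count_singleton (t : String) (xs : List String) :
    (xs.map (fun date => PySem.List.count [t] date)).sum = PySem.List.count xs t := by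
  induction xs with
  | nil => simp [PySem.List.count]
  | cons x xs ih =>
      rw [List.map_cons, List.sum_cons, ih]
      simp only [PySem.List.count, List.count_cons, List.count_nil]
      by_cases h : x = t
      · simp [h]; ring
      · simp [h, Ne.symm h]

theorem count_treatment_dates_spec : Claim_equal_count_treatment_dates := by
  intro tds tg _
  unfold Spec_count_treatment_dates count_treatment_dates count_treatment_dates_alt
  rw [sum_count_singleton]
  by_cases h : tds = [] <;> simp [h, PySem.List.count]
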